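-- pv_equiv track=rewrite | github.com/N-Erickson/AetherLink-SDR-MCP | sdr_mcp/decoders/pocsag.py | _decode_alphanumeric
-- ===== SOURCE A (Python) =====
-- from typing import Dict, List, Optional, Any
--
-- def _decode_alphanumeric(data_words: List[int]) -> str:
--     """Decode alphanumeric pager message (7-bit ASCII)"""
--     bits = []
--     for word in data_words:
--         # Extract 20 bits
--         for i in range(20):
--             bits.append((word >> i) & 1)
--
--     # Convert to 7-bit ASCII characters
--     result = []
--     for i in range(0, len(bits) - 6, 7):
--         char_bits = bits[i:i+7]
--         char_val = sum(bit << idx for idx, bit in enumerate(char_bits))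
--         if 32 <= char_val <= 126:  # Printable ASCII
--             result.append(chr(char_val))
--
--     return ''.join(result).strip()
-- ===== SOURCE B (Python) =====
-- def _decode_alphanumeric(data_words):
--     """Decode alphanumeric pager message (7-bit ASCII) — single streaming pass."""
--     acc = 0
--     nbits = 0
--     result = []
--     for word in data_words:
--         acc |= (word & 0xFFFFF) << nbits
--         nbits += 20
--         while nbits >= 7:
--             v = acc & 0x7F
--             acc >>= 7
--             nbits -= 7
--             if 32 <= v <= 126:
--                 result.append(chr(v))
--     return ''.join(result).strip()
-- ===== Notes on version B (the rewrite author's own statement) =====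
-- stated objective: faster
-- what changed: Replaces A's two-phase decode (materialise a 20n-element per-bit Python list, then slice it 7 bits at a time summing each slice with enumerate) with a single streaming pass over data_words that keeps the pending bits in one integer accumulator and peels each 7-bit character with shifts and masks.
import Mathlib
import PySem

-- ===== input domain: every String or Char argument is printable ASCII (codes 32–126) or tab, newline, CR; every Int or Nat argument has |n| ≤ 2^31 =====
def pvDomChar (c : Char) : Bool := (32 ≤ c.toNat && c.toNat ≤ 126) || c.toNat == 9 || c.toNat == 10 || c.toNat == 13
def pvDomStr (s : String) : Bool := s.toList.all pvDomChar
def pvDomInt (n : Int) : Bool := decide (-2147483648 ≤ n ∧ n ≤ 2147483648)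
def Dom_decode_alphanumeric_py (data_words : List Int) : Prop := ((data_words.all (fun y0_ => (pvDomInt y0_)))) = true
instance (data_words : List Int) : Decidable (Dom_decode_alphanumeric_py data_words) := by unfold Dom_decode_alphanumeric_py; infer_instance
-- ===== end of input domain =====

-- B rewrites A's two-phase decode (materialise a per-bit list, then slice it 7 bits at a time) as one
-- streaming pass holding the pending bits in an integer accumulator; same value, measured faster (constant factor).

-- ===== PORT A =====
-- Literal port of A: build the LSB-first bit list word by word, then take 7-bit groups.
-- Python `word >> i` / `bit << idx` are Lean's `>>>` / `<<<` on Int with a Nat shift count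
-- (the range/enumerate indices are nonnegative, so `.toNat` is exact); `x & 1` is PySem.Int.band.
def decode_alphanumeric_py (data_words : List Int) : String :=
  let bits : List Int := data_words.foldl (fun bits word =>
    (PySem.List.pyRange 0 20 1).foldl
      (fun bits i => bits ++ [PySem.Int.band (word >>> i.toNat) 1]) bits) []
  let result : List Char := (PySem.List.pyRange 0 ((bits.length : Int) - 6) 7).foldl
    (fun result i =>
      let char_bits := PySem.List.slice bits (some i) (some (i + 7))
      let char_val : Int :=
        ((PySem.List.enumerate char_bits 0).map (fun p => p.2 <<< p.1.toNat)).sum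
      if 32 ≤ char_val ∧ char_val ≤ 126 then result ++ [Char.ofNat char_val.toNat]
      else result) []
  PySem.Str.strip (String.ofList result)

-- ===== PORT B =====
-- Literal port of B's inner `while nbits >= 7` loop (the local `v = acc & 0x7F` is written
-- inline; nbits only ever holds nonnegative values, so `.toNat` on shift counts is exact).
def bPeel (acc nbits : Int) (result : List Char) : Int × Int × List Char :=
  if _h : 7 ≤ nbits then
    bPeel (acc >>> (7 : Nat)) (nbits - 7)
      (if 32 ≤ PySem.Int.band acc 127 ∧ PySem.Int.band acc 127 ≤ 126
       then result ++ [Char.ofNat (PySem.Int.band acc 127).toNat] else result)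
  else (acc, nbits, result)
termination_by nbits.toNat
decreasing_by omega

def decode_alphanumeric_py_alt (data_words : List Int) : String :=
  let st := data_words.foldl
    (fun (st : Int × Int × List Char) word =>
      bPeel (PySem.Int.bor st.1 (PySem.Int.band word 1048575 <<< st.2.1.toNat))
        (st.2.1 + 20) st.2.2)
    (0, 0, [])
  PySem.Str.strip (String.ofList st.2.2)

-- ===== PRECONDITION & SPEC =====
def Spec_decode_alphanumeric_py (data_words : List Int) (out : String) : Prop := out = decode_alphanumeric_py_alt data_words
instance (data_words : List Int) (out : String) : Decidable (Spec_decode_alphanumeric_py data_words out) := by unfold Spec_decode_alphanumeric_py; infer_instance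

-- ===== CLAIM (what is proved, stated in full; the proofs are below) =====
def Claim_equal_decode_alphanumeric_py : Prop := ∀ (data_words : List Int), Dom_decode_alphanumeric_py data_words → Spec_decode_alphanumeric_py data_words (decode_alphanumeric_py data_words)

-- ===== LEMMAS AND PROOFS =====

-- value of an LSB-first 0/1 list
def lval : List Int → Nat
  | [] => 0
  | b :: t => b.toNat + 2 * lval t

-- low 20 bits of a word, as Python computes them (w mod 2^20)
def m20 (w : Int) : Nat := (w % 1048576).toNat

-- value of the whole 20-bit-per-word stream
def wval : List Int → Nat
  | [] => 0
  | w :: t => m20 w + 1048576 * wval t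

-- the characters produced from a value `a` holding `m` pending bits
def chunkChars (a m : Nat) : List Char :=
  if _h : 7 ≤ m then
    (if 32 ≤ a % 128 ∧ a % 128 ≤ 126 then [Char.ofNat (a % 128)] else []) ++
      chunkChars (a / 128) (m - 7)
  else []
termination_by m

-- bit i of a word, as A computes it
def bitAt (w : Int) (i : Nat) : Int := PySem.Int.band (w >>> i) 1

-- A's bit list
def bitsList (ws : List Int) : List Int :=
  ws.flatMap (fun w => (List.range 20).map (bitAt w))

-- A's loop body
def aStep (l : List Int) (res : List Char) (i : Int) : List Char :=
  let char_bits := PySem.List.slice l (some i) (some (i + 7))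
  let char_val : Int :=
    ((PySem.List.enumerate char_bits 0).map (fun p => p.2 <<< p.1.toNat)).sum
  if 32 ≤ char_val ∧ char_val ≤ 126 then res ++ [Char.ofNat char_val.toNat] else res

-- ---- small shift/mask bridges ----
lemma sr_natCast (m n : Nat) : ((m : Int) >>> n) = ((m >>> n : Nat) : Int) := rfl
lemma sr_negSucc (m n : Nat) : (Int.negSucc m) >>> n = Int.negSucc (m >>> n) := rfl
lemma sl_natCast (m n : Nat) : ((m : Int) <<< n) = ((m <<< n : Nat) : Int) := rfl

lemma sr_zero (w : Int) : w >>> (0 : Nat) = w := by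
  cases w with
  | ofNat m => rw [show Int.ofNat m = (m : Int) from rfl, sr_natCast, Nat.shiftRight_zero]
  | negSucc m => rw [sr_negSucc, Nat.shiftRight_zero]

lemma sr_one (w : Int) : w >>> (1 : Nat) = w / 2 := by
  cases w with
  | ofNat m =>
    rw [show Int.ofNat m = (m : Int) from rfl, sr_natCast, Nat.shiftRight_eq_div_pow]
    omega
  | negSucc m =>
    rw [sr_negSucc, Nat.shiftRight_eq_div_pow, Int.negSucc_eq, Int.negSucc_eq]
    omega

lemma sr_succ (w : Int) (i : Nat) : w >>> (i + 1) = (w >>> (1 : Nat)) >>> i := by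
  cases w with
  | ofNat m =>
    rw [show Int.ofNat m = (m : Int) from rfl, sr_natCast, sr_natCast, sr_natCast,
      Nat.add_comm, Nat.shiftRight_add]
  | negSucc m => rw [sr_negSucc, sr_negSucc, sr_negSucc, Nat.add_comm, Nat.shiftRight_add]

lemma sr7 (a : Nat) : ((a : Int) >>> (7 : Nat)) = ((a / 128 : Nat) : Int) := by
  rw [sr_natCast, Nat.shiftRight_eq_div_pow]

lemma band127 (a : Nat) : PySem.Int.band (a : Int) 127 = ((a % 128 : Nat) : Int) := by
  rw [show (127 : Int) = ((127 : Nat) : Int) from rfl, PySem.Int.band_natCast]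
  congr 1
  have h := Nat.and_two_pow_sub_one_eq_mod a 7
  norm_num at h
  exact h

lemma band_mask (w : Int) : PySem.Int.band w 1048575 = w % 1048576 := by
  unfold PySem.Int.band
  split_ifs with h1 h2 h2
  · rw [show Int.toNat 1048575 = 1048575 from rfl]
    have h := Nat.and_two_pow_sub_one_eq_mod w.toNat 20
    norm_num at h
    omega
  · omega
  · rw [show Int.toNat 1048575 = 1048575 from rfl, Nat.and_comm]
    generalize hx : (-w - 1).toNat = x
    have h := Nat.and_two_pow_sub_one_eq_mod x 20
    norm_num at h
    rw [h]
    omega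
  · omega

lemma emod_two_mul (w N : Int) (hN : 0 < N) :
    w % (2 * N) = w % 2 + 2 * ((w / 2) % N) := by
  have hq1 : 0 ≤ (w / 2) % N := Int.emod_nonneg _ (by omega)
  have hq2 : (w / 2) % N < N := Int.emod_lt_of_pos _ hN
  have h1 : w % 2 + 2 * (w / 2) = w := Int.emod_add_mul_ediv w 2
  have h2 : (w / 2) % N + N * (w / 2 / N) = w / 2 := Int.emod_add_mul_ediv (w / 2) N
  have key : w = (w % 2 + 2 * ((w / 2) % N)) + (2 * N) * (w / 2 / N) := by
    linear_combination -h1 - 2 * h2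
  conv_lhs => rw [key]
  rw [Int.add_mul_emod_self_left]
  exact Int.emod_eq_of_lt (by omega) (by omega)

lemma bit_sum (k : Nat) : ∀ (w : Int),
    lval ((List.range k).map (bitAt w)) = (w % ((2 ^ k : Nat) : Int)).toNat := by
  induction k with
  | zero => intro w; simp [lval]
  | succ k ih =>
    intro w
    rw [List.range_succ_eq_map, List.map_cons, List.map_map]
    have hfun : (bitAt w ∘ Nat.succ) = bitAt (w >>> (1 : Nat)) := by
      funext i
      show bitAt w (i + 1) = _
      unfold bitAt
      rw [sr_succ]
    rw [hfun]
    show (bitAt w 0).toNat + 2 * lval ((List.range k).map (bitAt (w >>> (1:Nat)))) = _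
    rw [ih (w >>> (1 : Nat))]
    unfold bitAt
    rw [sr_zero, sr_one, PySem.Int.band_one, PySem.Int.mod_eq_emod_of_pos (by omega)]
    have hcast : ((2 ^ (k + 1) : Nat) : Int) = 2 * ((2 ^ k : Nat) : Int) := by
      push_cast; ring
    rw [hcast]
    have hmul := emod_two_mul w ((2 ^ k : Nat) : Int) (by positivity)
    have hB0 : 0 ≤ (w / 2) % ((2 ^ k : Nat) : Int) := Int.emod_nonneg _ (by positivity)
    generalize hB : (w / 2) % ((2 ^ k : Nat) : Int) = B at hmul hB0 ⊢
    generalize hA : w % (2 * ((2 ^ k : Nat) : Int)) = A at hmul ⊢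
    omega

-- ---- lval arithmetic ----
lemma lval_append (u v : List Int) : lval (u ++ v) = lval u + 2 ^ u.length * lval v := by
  induction u with
  | nil => simp [lval]
  | cons b t ih =>
    show b.toNat + 2 * lval (t ++ v) = (b.toNat + 2 * lval t) + 2 ^ (t.length + 1) * lval v
    rw [ih, pow_succ]
    ring

lemma nat_mod_two_mul (b x N : Nat) (hb : b ≤ 1) (hN : 0 < N) :
    (b + 2 * x) % (2 * N) = b + 2 * (x % N) := by
  have h1 : 2 * x % (2 * N) = 2 * (x % N) := Nat.mul_mod_mul_left 2 x N
  have h2 : x % N < N := Nat.mod_lt x hN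
  have hb' : b % (2 * N) = b := Nat.mod_eq_of_lt (by omega)
  rw [Nat.add_mod, h1, hb']
  exact Nat.mod_eq_of_lt (by omega)

lemma nat_div_two_mul (b x N : Nat) (hb : b ≤ 1) (_hN : 0 < N) :
    (b + 2 * x) / (2 * N) = x / N := by
  rw [← Nat.div_div_eq_div_mul]
  congr 1
  omega

lemma lval_le_one (l : List Int) (hb : ∀ b ∈ l, b = 0 ∨ b = 1) (b : Int) (h : b ∈ l) :
    b.toNat ≤ 1 := by rcases hb b h with h' | h' <;> simp [h']

lemma lval_take (k : Nat) : ∀ (l : List Int), (∀ b ∈ l, b = 0 ∨ b = 1) →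
    lval (l.take k) = lval l % 2 ^ k := by
  induction k with
  | zero => intro l _; simp [lval, Nat.mod_one]
  | succ k ih =>
    intro l hb
    cases l with
    | nil => simp [lval]
    | cons b t =>
      rw [List.take_succ_cons]
      show b.toNat + 2 * lval (t.take k) = (b.toNat + 2 * lval t) % 2 ^ (k + 1)
      rw [ih t (fun x hx => hb x (List.mem_cons_of_mem _ hx)), pow_succ,
        Nat.mul_comm (2 ^ k) 2,
        nat_mod_two_mul _ _ _ (lval_le_one _ hb b (by simp)) (by positivity)]

lemma lval_drop (k : Nat) : ∀ (l : List Int), (∀ b ∈ l, b = 0 ∨ b = 1) →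
    lval (l.drop k) = lval l / 2 ^ k := by
  induction k with
  | zero => intro l _; simp
  | succ k ih =>
    intro l hb
    cases l with
    | nil => simp [lval]
    | cons b t =>
      rw [List.drop_succ_cons]
      show lval (t.drop k) = (b.toNat + 2 * lval t) / 2 ^ (k + 1)
      rw [ih t (fun x hx => hb x (List.mem_cons_of_mem _ hx)), pow_succ,
        Nat.mul_comm (2 ^ k) 2,
        nat_div_two_mul _ _ _ (lval_le_one _ hb b (by simp)) (by positivity)]

-- ---- chunkChars ----
lemma chunkChars_nil (a m : Nat) (h : m < 7) : chunkChars a m = [] := by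
  rw [chunkChars, dif_neg (by omega)]

lemma chunkChars_cons (a m : Nat) (h : 7 ≤ m) :
    chunkChars a m =
      (if 32 ≤ a % 128 ∧ a % 128 ≤ 126 then [Char.ofNat (a % 128)] else []) ++
        chunkChars (a / 128) (m - 7) := by
  rw [chunkChars, dif_pos h]

lemma pow_split (m : Nat) : (2 : Nat) ^ m = 128 ^ (m / 7) * 2 ^ (m % 7) := by
  conv_lhs => rw [← Nat.div_add_mod m 7]
  rw [pow_add, pow_mul]
  norm_num

lemma div128_div (a m : Nat) (h : 7 ≤ m) :
    a / 128 / 128 ^ ((m - 7) / 7) = a / 128 ^ (m / 7) := by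
  rw [Nat.div_div_eq_div_mul]
  congr 1
  rw [show (128 : Nat) * 128 ^ ((m - 7) / 7) = 128 ^ ((m - 7) / 7 + 1) from (pow_succ' 128 _).symm]
  congr 1
  omega

lemma chunk_compose (m : Nat) : ∀ (a X k : Nat),
    chunkChars (a + X * 2 ^ m) (m + k) =
      chunkChars a m ++ chunkChars (a / 128 ^ (m / 7) + X * 2 ^ (m % 7)) (m % 7 + k) := by
  induction m using Nat.strong_induction_on with
  | _ m IH =>
    intro a X k
    by_cases h7 : 7 ≤ m
    · have hsplit : (2 : Nat) ^ m = 2 ^ (m - 7) * 128 := by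
        conv_lhs => rw [show m = (m - 7) + 7 by omega]
        rw [pow_add]
        norm_num
      rw [chunkChars_cons (a + X * 2 ^ m) (m + k) (by omega), chunkChars_cons a m h7]
      have hmod : (a + X * 2 ^ m) % 128 = a % 128 := by
        rw [hsplit, ← Nat.mul_assoc]
        exact Nat.add_mul_mod_self_right a (X * 2 ^ (m - 7)) 128
      have hdiv : (a + X * 2 ^ m) / 128 = a / 128 + X * 2 ^ (m - 7) := by
        rw [hsplit, ← Nat.mul_assoc]
        exact Nat.add_mul_div_right a (X * 2 ^ (m - 7)) (by norm_num)
      rw [hmod, hdiv, show m + k - 7 = (m - 7) + k by omega,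
        IH (m - 7) (by omega) (a / 128) X k, div128_div a m h7,
        show (m - 7) % 7 = m % 7 by omega, List.append_assoc]
    · have h1 : m / 7 = 0 := by omega
      have h2 : m % 7 = m := by omega
      rw [chunkChars_nil a m (by omega), h1, h2]
      simp

-- ---- bPeel characterisation ----
lemma bPeel_spec (nb : Nat) : ∀ (a : Nat) (res : List Char),
    bPeel ((a : Nat) : Int) ((nb : Nat) : Int) res =
      (((a / 128 ^ (nb / 7) : Nat) : Int), ((nb % 7 : Nat) : Int), res ++ chunkChars a nb) := by
  induction nb using Nat.strong_induction_on with
  | _ nb IH =>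
    intro a res
    by_cases h7 : 7 ≤ nb
    · rw [bPeel, dif_pos (show (7 : Int) ≤ ((nb : Nat) : Int) by exact_mod_cast h7)]
      rw [band127, sr7, show ((nb : Nat) : Int) - 7 = ((nb - 7 : Nat) : Int) by omega]
      have hcond : ((32 : Int) ≤ ((a % 128 : Nat) : Int) ∧ ((a % 128 : Nat) : Int) ≤ 126) ↔
          (32 ≤ a % 128 ∧ a % 128 ≤ 126) := by omega
      rw [IH (nb - 7) (by omega) (a / 128) _]
      rw [div128_div a nb h7, show (nb - 7) % 7 = nb % 7 by omega, chunkChars_cons a nb h7]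
      simp only [hcond, Int.toNat_natCast]
      rw [← List.append_assoc]
      congr 1
      by_cases hc : 32 ≤ a % 128 ∧ a % 128 ≤ 126
      · rw [if_pos hc, if_pos hc]
      · rw [if_neg hc, if_neg hc, List.append_nil]
    · rw [bPeel, dif_neg (show ¬ (7 : Int) ≤ ((nb : Nat) : Int) by exact_mod_cast h7)]
      rw [chunkChars_nil a nb (by omega), show nb / 7 = 0 by omega, show nb % 7 = nb by omega]
      simp

-- ---- B fold ----
lemma bFold (ws : List Int) : ∀ (a nb : Nat) (res : List Char), nb < 7 → a < 2 ^ nb →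
    (ws.foldl
      (fun (st : Int × Int × List Char) word =>
        bPeel (PySem.Int.bor st.1 (PySem.Int.band word 1048575 <<< st.2.1.toNat))
          (st.2.1 + 20) st.2.2)
      (((a : Nat) : Int), ((nb : Nat) : Int), res)).2.2
    = res ++ chunkChars (a + wval ws * 2 ^ nb) (nb + 20 * ws.length) := by
  induction ws with
  | nil =>
    intro a nb res h1 h2
    rw [List.foldl_nil]
    show res = res ++ chunkChars (a + wval [] * 2 ^ nb) (nb + 20 * List.length [])
    rw [show wval [] = 0 from rfl]
    simp [chunkChars_nil a nb h1]
  | cons w t ih =>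
    intro a nb res h1 h2
    rw [List.foldl_cons]
    dsimp only
    have hm20 : PySem.Int.band w 1048575 = ((m20 w : Nat) : Int) := by
      rw [band_mask]; unfold m20; omega
    rw [hm20, Int.toNat_natCast, sl_natCast, Nat.shiftLeft_eq, PySem.Int.bor_natCast]
    have hor : a ||| m20 w * 2 ^ nb = a + m20 w * 2 ^ nb := by
      calc a ||| m20 w * 2 ^ nb = 2 ^ nb * m20 w ||| a := by
            rw [Nat.or_comm, Nat.mul_comm]
        _ = 2 ^ nb * m20 w + a := (Nat.two_pow_add_eq_or_of_lt h2 (m20 w)).symm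
        _ = a + m20 w * 2 ^ nb := by ring
    rw [hor, show ((nb : Nat) : Int) + 20 = ((nb + 20 : Nat) : Int) by push_cast; ring,
      bPeel_spec (nb + 20) (a + m20 w * 2 ^ nb) res]
    have hm : m20 w < 1048576 := by unfold m20; omega
    have hlt : a + m20 w * 2 ^ nb < 2 ^ (nb + 20) := by
      have hstep : a + m20 w * 2 ^ nb < (1 + m20 w) * 2 ^ nb := by
        rw [add_mul, one_mul]; omega
      calc a + m20 w * 2 ^ nb < (1 + m20 w) * 2 ^ nb := hstep
        _ ≤ 1048576 * 2 ^ nb := Nat.mul_le_mul_right _ (by omega)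
        _ = 2 ^ (nb + 20) := by rw [pow_add]; norm_num [Nat.mul_comm]
    have ha2 : (a + m20 w * 2 ^ nb) / 128 ^ ((nb + 20) / 7) < 2 ^ ((nb + 20) % 7) := by
      rw [Nat.div_lt_iff_lt_mul (by positivity)]
      calc a + m20 w * 2 ^ nb < 2 ^ (nb + 20) := hlt
        _ = 128 ^ ((nb + 20) / 7) * 2 ^ ((nb + 20) % 7) := pow_split _
        _ = 2 ^ ((nb + 20) % 7) * 128 ^ ((nb + 20) / 7) := by ring
    rw [ih ((a + m20 w * 2 ^ nb) / 128 ^ ((nb + 20) / 7)) ((nb + 20) % 7) _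
      (Nat.mod_lt _ (by omega)) ha2]
    have harg : a + wval (w :: t) * 2 ^ nb = (a + m20 w * 2 ^ nb) + wval t * 2 ^ (nb + 20) := by
      show a + (m20 w + 1048576 * wval t) * 2 ^ nb = _
      rw [pow_add, show (2 : Nat) ^ 20 = 1048576 from by norm_num]
      ring
    have hlen : nb + 20 * (w :: t).length = (nb + 20) + 20 * t.length := by
      simp [List.length_cons]; ring
    rw [harg, hlen, chunk_compose (nb + 20) (a + m20 w * 2 ^ nb) (wval t) (20 * t.length),
      List.append_assoc]

-- ---- A side ----
lemma sumEnum : ∀ (c : List Int), (∀ b ∈ c, b = 0 ∨ b = 1) → ∀ (s : Nat),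
    ((PySem.List.enumerate c ((s : Nat) : Int)).map (fun p => p.2 <<< p.1.toNat)).sum =
      ((2 ^ s * lval c : Nat) : Int) := by
  intro c
  induction c with
  | nil => intro _ s; simp [PySem.List.enumerate_nil, lval]
  | cons b t ih =>
    intro hb s
    rw [PySem.List.enumerate_cons, List.map_cons, List.sum_cons]
    dsimp only
    rw [Int.toNat_natCast,
      show ((s : Nat) : Int) + 1 = ((s + 1 : Nat) : Int) by push_cast; ring,
      ih (fun x hx => hb x (List.mem_cons_of_mem _ hx)) (s + 1)]
    rcases hb b (by simp) with h' | h' <;> subst h'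
    · have hsh : (0 : Int) <<< s = ((0 : Nat) : Int) := by
        rw [show (0 : Int) = ((0 : Nat) : Int) from rfl, sl_natCast, Nat.zero_shiftLeft]
      have hl : lval ((0 : Int) :: t) = 2 * lval t := by simp [lval]
      rw [hsh, hl]
      push_cast
      ring
    · have hsh : (1 : Int) <<< s = ((2 ^ s : Nat) : Int) := by
        rw [show (1 : Int) = ((1 : Nat) : Int) from rfl, sl_natCast, Nat.one_shiftLeft]
      have hl : lval ((1 : Int) :: t) = 1 + 2 * lval t := by simp [lval]
      rw [hsh, hl]
      push_cast
      ring

lemma aStep_shift (l : List Int) (res : List Char) (k : Nat) :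
    aStep l res (7 * (((k + 1) : Nat) : Int)) = aStep (l.drop 7) res (7 * ((k : Nat) : Int)) := by
  simp only [aStep]
  rw [show (7 : Int) * (((k + 1) : Nat) : Int) = ((7 * (k + 1) : Nat) : Int) by push_cast; ring,
    show ((7 * (k + 1) : Nat) : Int) + 7 = ((7 * (k + 1) : Nat) : Int) + ((7 : Nat) : Int) by norm_num,
    PySem.List.slice_natCast_add,
    show (7 : Int) * ((k : Nat) : Int) = ((7 * k : Nat) : Int) by push_cast; ring,
    show ((7 * k : Nat) : Int) + 7 = ((7 * k : Nat) : Int) + ((7 : Nat) : Int) by norm_num,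
    PySem.List.slice_natCast_add, List.drop_drop, show 7 + 7 * k = 7 * (k + 1) by ring]

lemma aStep_head (l : List Int) (res : List Char) (hb : ∀ b ∈ l, b = 0 ∨ b = 1) :
    aStep l res (7 * (((0 : Nat)) : Int)) =
      res ++ (if 32 ≤ lval l % 128 ∧ lval l % 128 ≤ 126
              then [Char.ofNat (lval l % 128)] else []) := by
  simp only [aStep]
  rw [show (7 : Int) * (((0 : Nat)) : Int) = ((0 : Nat) : Int) by norm_num,
    show ((0 : Nat) : Int) + 7 = ((0 : Nat) : Int) + ((7 : Nat) : Int) by norm_num,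
    PySem.List.slice_natCast_add, List.drop_zero]
  have hb7 : ∀ b ∈ l.take 7, b = 0 ∨ b = 1 := fun b hx => hb b (List.mem_of_mem_take hx)
  rw [show (0 : Int) = ((0 : Nat) : Int) from rfl, sumEnum (l.take 7) hb7 0,
    pow_zero, one_mul, lval_take 7 l hb, show (2 : Nat) ^ 7 = 128 from by norm_num,
    Int.toNat_natCast]
  by_cases hc : 32 ≤ lval l % 128 ∧ lval l % 128 ≤ 126
  · rw [if_pos (by exact_mod_cast hc), if_pos hc]
  · rw [if_neg (by exact_mod_cast hc), if_neg hc, List.append_nil]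

lemma AL : ∀ (n : Nat) (l : List Int) (res : List Char), (∀ b ∈ l, b = 0 ∨ b = 1) →
    n = l.length / 7 →
    (List.range n).foldl (fun res k => aStep l res (7 * ((k : Nat) : Int))) res =
      res ++ chunkChars (lval l) l.length := by
  intro n
  induction n with
  | zero =>
    intro l res _ hn
    rw [List.range_zero, List.foldl_nil, chunkChars_nil _ _ (by omega), List.append_nil]
  | succ n ih =>
    intro l res hb hn
    have h7 : 7 ≤ l.length := by omega
    rw [List.range_succ_eq_map, List.foldl_cons, List.foldl_map,
      PySem.List.foldl_congr_mem (List.range n) _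
        (fun res k => aStep (l.drop 7) res (7 * ((k : Nat) : Int))) _
        (fun acc x _ => aStep_shift l acc x),
      ih (l.drop 7) _ (fun b hx => hb b (List.mem_of_mem_drop hx))
        (by rw [List.length_drop]; omega),
      aStep_head l res hb, lval_drop 7 l hb, List.length_drop,
      chunkChars_cons (lval l) l.length h7,
      show (2 : Nat) ^ 7 = 128 from by norm_num, List.append_assoc]

lemma bitsList_length (ws : List Int) : (bitsList ws).length = 20 * ws.length := by
  induction ws with
  | nil => simp [bitsList]
  | cons w t ih =>
    show ((List.range 20).map (bitAt w) ++ bitsList t).length = 20 * (t.length + 1)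
    rw [List.length_append, List.length_map, List.length_range, ih]
    ring

lemma bitsList_lval (ws : List Int) : lval (bitsList ws) = wval ws := by
  induction ws with
  | nil => simp [bitsList, lval, wval]
  | cons w t ih =>
    show lval ((List.range 20).map (bitAt w) ++ bitsList t) = m20 w + 1048576 * wval t
    rw [lval_append, List.length_map, List.length_range, ih, bit_sum 20 w]
    norm_num [m20]

lemma bitsList_bool (ws : List Int) : ∀ b ∈ bitsList ws, b = 0 ∨ b = 1 := by
  intro b hbm
  simp only [bitsList, List.mem_flatMap, List.mem_map, List.mem_range] at hbm
  obtain ⟨w, _, i, _, rfl⟩ := hbm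
  unfold bitAt
  rw [PySem.Int.band_one, PySem.Int.mod_eq_emod_of_pos (by omega)]
  omega

lemma A_chars (ws : List Int) :
    decode_alphanumeric_py ws =
      PySem.Str.strip (String.ofList (chunkChars (wval ws) (20 * ws.length))) := by
  dsimp only [decode_alphanumeric_py]
  have hbits : ws.foldl (fun bits word =>
      (PySem.List.pyRange 0 20 1).foldl
        (fun bits i => bits ++ [PySem.Int.band (word >>> i.toNat) 1]) bits) [] = bitsList ws := by
    rw [PySem.List.foldl_congr_mem ws _
      (fun bits word => bits ++ (List.range 20).map (bitAt word)) []
      (fun acc w _ => by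
        rw [PySem.List.foldl_append_singleton_eq_map]
        congr 1),
      PySem.List.foldl_append_eq_flatMap]
    rfl
  rw [hbits]
  have hrange : PySem.List.pyRange 0 (((bitsList ws).length : Int) - 6) 7 =
      (List.range ((bitsList ws).length / 7)).map (fun k => 7 * ((k : Nat) : Int)) := by
    rw [PySem.List.pyRange_of_pos 0 _ (by norm_num)]
    congr 1
    · funext k
      rw [zero_add]
    · congr 1
      split <;> omega
  rw [hrange, List.foldl_map]
  have hal := AL ((bitsList ws).length / 7) (bitsList ws) [] (bitsList_bool ws) rfl
  rw [bitsList_lval, List.nil_append] at hal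
  refine (congrArg (fun cs => PySem.Str.strip (String.ofList cs)) hal).trans ?_
  rw [bitsList_length]

lemma B_chars (ws : List Int) :
    decode_alphanumeric_py_alt ws =
      PySem.Str.strip (String.ofList (chunkChars (wval ws) (20 * ws.length))) := by
  dsimp only [decode_alphanumeric_py_alt]
  have h := bFold ws 0 0 [] (by omega) (by omega)
  rw [show (((0 : Nat) : Int)) = (0 : Int) from rfl] at h
  rw [h]
  norm_num

-- ===== VERDICT (by name: the statement is the Claim_ definition above) =====
theorem decode_alphanumeric_py_spec : Claim_equal_decode_alphanumeric_py := by
  intro ws _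
  unfold Spec_decode_alphanumeric_py
  rw [A_chars, B_chars]
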